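/- GENERATED by mk_final_copies.py from the proof of the farm's unit `get_bits.24` (farm:get_bits.24.1: Lemmas.lean) as the
   re-elaboration sweep compiled it — do not edit. -/
/-
  LEMMAS OF THE UNIT `get_bits.24` (get_bits, stage 1: `n ≤ 24`; CONTRACTS 50; stb_vorbis_fixed.c:1627–1655).

      vb_add8_toNat · ofNat32_toInt      `valid_bits + 8` and a small `valid_bits` in the walker's bit-vector forms
      round_stores                       one round's stores (a return address, `acc`, `valid_bits`): `Bits` again, μ kept
      take_post · eop_post               the postcondition at the two exits after the loop test: the extraction, the end of packet
      loop_ok                            THE LOOP, from its invariant at the head 0x10d213 to the function's `Returned`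
  Proof.lean walks from the entry to the loop head (or a `ret`) and applies `loop_ok` at the two states that reach the head.
-/
import Asan.CheckWalk
import Vorbis.Spec.ReaderLemmas
import Vorbis.Spec.Units.get_bits_24

open X86 X86.User Asan Vorbis

set_option maxRecDepth 4000
set_option maxHeartbeats 4000000

namespace Vorbis.Spec.get_bits_24

/-- `lea eax, [rcx + 8]` on `valid_bits < 24`, as a number: no wrap. -/
theorem vb_add8_toNat : ∀ m : Nat, m < 24 →
    (BitVec.setWidth 32 (Word.ofBV (BitVec.ofNat 32 m) + 8).toBitVec).toNat = m + 8 := by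
  decide

/-- A small `valid_bits` as the signed number the compares see. -/
theorem ofNat32_toInt (m : Nat) (h : m < 2 ^ 31) : (BitVec.ofNat 32 m).toInt = (m : Int) :=
  Vorbis.Spec.Segment.toInt_small m h

/-- One round of the loop (a return address on the stack, `acc`, `valid_bits`) in the walker's address forms: `Bits` again,
μ kept. -/
theorem round_stores {Blk : Block → Prop} {len : Nat} {M : Mem} {f : Nat} (h : Bits Blk len M f) (sp : Word) (r : Nat)
    (hlt : sp.toNat + 8 < 2 ^ 64) (hsp : sp.toNat + 8 ≤ f ∨ f + 1808 ≤ sp.toNat) (A : Nat) (x : BitVec 32)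
    (hx : -1 ≤ x.toInt ∧ x.toInt ≤ 32) :
    Bits Blk len (((M.writeLE sp 8 r).writeLE (addr f + 1764) 4 A).writeLE (addr f + 1768) 4 x.toNat) f ∧
      mu (((M.writeLE sp 8 r).writeLE (addr f + 1764) 4 A).writeLE (addr f + 1768) 4 x.toNat) f = mu M f := by
  rw [addr_add_lit, addr_add_lit]
  have k := Vorbis.Spec.BitReader.three_stores h sp r hlt hsp A x hx
  exact ⟨k.1, k.2.1⟩

/-- **The extraction exit** `z = acc & mask; acc >>= n; valid_bits -= n` (0x10d2ac … `ret`), from a memory `M` in which `Bits`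
holds and μ is not larger than at the entry: the three stores (a check's return address, `acc`, `valid_bits`) give the
function's postcondition. `hprog` is the progress clause: from `valid_bits = 0` and `n ≥ 1` a byte was read before. -/
theorem take_post {Blk : Block → Prop} {len : Nat} {mem M : Mem} {f n z : Nat} (hb : Bits Blk len M f)
    (hmu : mu M f ≤ mu mem f) (hvb0 : 0 ≤ stb_vorbis.valid_bits mem f)
    (hprog : stb_vorbis.valid_bits mem f = 0 → 1 ≤ n → mu M f < mu mem f) (sp : Word) (r : Nat)
    (hlt : sp.toNat + 8 < 2 ^ 64) (hsp : sp.toNat + 8 ≤ f ∨ f + 1808 ≤ sp.toNat) (A : Nat) (x : BitVec 32)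
    (hx : -1 ≤ x.toInt ∧ x.toInt ≤ 32) (hz : GetBitsResult n z) :
    GetBitsPost Blk len mem (((M.writeLE sp 8 r).writeLE (addr f + 1764) 4 A).writeLE (addr f + 1768) 4 x.toNat) f n z := by
  obtain ⟨hb', emu⟩ := round_stores hb sp r hlt hsp A x hx
  refine ⟨hb', hz, ?_, ?_, ?_⟩
  · rw [emu]
    exact hmu
  · intro hneg
    omega
  · intro h0 hn1
    right
    rw [emu]
    exact hprog h0 hn1

/-- **The end-of-packet exit** `f->valid_bits = INVALID_BITS; return 0;` (0x10d28f … `ret`): two stores (a check's return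
address, `valid_bits = −1`) over a memory `M` in which `Bits` holds and μ is not larger than at the entry. -/
theorem eop_post {Blk : Block → Prop} {len : Nat} {mem M : Mem} {f : Nat} (n : Nat) (hb : Bits Blk len M f)
    (hmu : mu M f ≤ mu mem f) (hvb0 : 0 ≤ stb_vorbis.valid_bits mem f) (sp : Word) (r : Nat)
    (hlt : sp.toNat + 8 < 2 ^ 64) (hsp : sp.toNat + 8 ≤ f ∨ f + 1808 ≤ sp.toNat) :
    GetBitsPost Blk len mem ((M.writeLE sp 8 r).writeLE (addr f + 1768) 4 4294967295) f n 0 := by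
  rw [addr_add_lit]
  have k := Vorbis.Spec.BitReader.eop_stores hb sp r hlt hsp
  refine ⟨k.1, ⟨by decide, fun _ => Nat.two_pow_pos n⟩, ?_, ?_, ?_⟩
  · rw [k.2.1]
    exact hmu
  · intro hneg
    omega
  · intro _ _
    left
    exact ⟨rfl, k.2.2⟩

/-- **THE LOOP `while (f->valid_bits < n) { z = get8_packet_raw(f); … }`** (head 0x10d213 = `Vorbis.L.get_bits.loop1`,
stb_vorbis_fixed.c:1639; back edge 0x10d26a), walked from ANY state `s` at the head that satisfies the invariant to the
function's `Returned`: through the end-of-packet arm (0x10d28f: `valid_bits = -1; return 0`) or the loop's exit and the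
extraction (0x10d2ac … `ret`). `u` is the state at the function's entry, `f = u.rdi`, `n = u.esi ≤ 24`.
THE INVARIANT (the hypotheses about `s`; `m` is the ghost variable = `valid_bits` as the 32-bit load reads it):
    rip = head · r12d = n · rbx = f · rsp = u.rsp − 40 · the code span as in `u₀`
    hsame : nothing written but the stack window and get_bits' windows of `*f` (a LITERAL list) · hun : no store to the shadow
    hs0 … hs4 : the return address and the four saved registers in their slots · hdf, hmx : DF = 0, the MXCSR masks
    hrp : `Bits` now and μ not larger than at the entry · hm, hm31 : `valid_bits = m ≤ 31`
    hprog : PROGRESS — from `valid_bits = 0` at the entry, either still `valid_bits = 0` or μ is strictly smaller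
MEASURE: μ (every round that goes round again read a byte: `PacketRawPost.strict`). -/
theorem loop_ok (Lay : Layout) (hLay : Lay.hi = 0x1000000) (μ : Microarch) (hμ : UserX.MicroOK μ) (u₀ : State)
    (hcode : HasCodeNat Lay u₀ Vorbis.L.get_bits.entry Vorbis.Code.code_get_bits.nat Vorbis.L.get_bits.size)
    (hload4 : Asan.SmallCheck Lay μ Vorbis.WayInv (Vorbis.CodeOK u₀) [.rax, .rcx, .rdx] 4
      Vorbis.L.__asan_load4_noabort.entry)
    (hstore4 : Asan.SmallCheck Lay μ Vorbis.WayInv (Vorbis.CodeOK u₀) [.rax, .rcx, .rdx] 4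
      Vorbis.L.__asan_store4_noabort.entry)
    (others : List Obj) (frames : List (Nat × FrameLayout)) (Blk : Block → Prop) (len : Nat)
    (hraw : Calls Lay μ Vorbis.WayInv (Vorbis.conv u₀) Vorbis.L.get8_packet_raw.entry
      (Vorbis.Spec.get8_packet_raw.spec others frames Blk len))
    (u : State) (ret : Word)
    (he : AtEntry (Vorbis.conv u₀) Vorbis.L.get_bits.entry (Vorbis.Spec.get_bits.spec24 others frames Blk len).frame ret u)
    (hpre : Vorbis.Spec.ReaderPre others frames Blk len u) (f n : Nat) (hf : (u.reg .rdi).toNat = f)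
    (hn : (u.reg .rsi).toNat % 2 ^ 32 = n) (hn24 : n ≤ 24)
    (hvb0 : 0 ≤ stb_vorbis.valid_bits u.mem f)
    (s : State) (m : Nat)
    (w_rip : s.rip = Vorbis.L.get_bits.loop1)
    (w_r12 : s.reg .r12 = Word.ofBV (Word.part Width.w32 (u.reg .rsi)))
    (w_rbx : s.reg .rbx = addr f)
    (w_rsp : s.reg .rsp = u.reg .rsp - 40)
    (w_kept : RegsKept [.rdi, .r12, .rbx, .rsp, .rax, .rcx, .rdx] u s)
    (w_eq : Mem.EqOn 1048576 1154368 u₀.mem s.mem)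
    (hsame : Mem.SameExcept [⟨(u.reg .rsp).toNat - 304, (u.reg .rsp).toNat⟩,
       ⟨f + 48, f + 56⟩, ⟨f + 84, f + 96⟩, ⟨f + 136, f + 144⟩, ⟨f + 1484, f + 1749⟩, ⟨f + 1752, f + 1784⟩] u.mem s.mem)
    (hun : ShadowUntouched u.mem s.mem)
    (hs0 : UInt64.ofNat (s.mem.readLE (u.reg .rsp) 8) = ret)
    (hs1 : UInt64.ofNat (s.mem.readLE (u.reg .rsp - 8) 8) = u.reg .r13)
    (hs2 : UInt64.ofNat (s.mem.readLE (u.reg .rsp - 16) 8) = u.reg .r12)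
    (hs3 : UInt64.ofNat (s.mem.readLE (u.reg .rsp - 24) 8) = u.reg .rbp)
    (hs4 : UInt64.ofNat (s.mem.readLE (u.reg .rsp - 32) 8) = u.reg .rbx)
    (hdf : s.flags .df = false)
    (hmx : s.mxcsr &&& 8064 = 8064)
    (hrp : ReaderPost Blk len u.mem s.mem f)
    (hm : s.mem.readLE (addr f + 1768) 4 = m)
    (hm31 : m ≤ 31)
    (hprog : stb_vorbis.valid_bits u.mem f = 0 → m = 0 ∨ mu s.mem f < mu u.mem f) :
    ReachVia Lay μ Vorbis.WayInv s
      (Returned (Vorbis.conv u₀) (Vorbis.Spec.get_bits.spec24 others frames Blk len) u ret) := by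
  v_entry he
  have hsp := hpre.shadow.rsp
  have hwhere := hpre.where_obj
  -- `n` as the signed number the compares see
  have hnI : (Word.part Width.w32 (u.reg .rsi)).toInt = (n : Int) := by
    rw [← hn]
    exact Vorbis.Spec.BitReader.arg_toInt _ (by omega)
  have hfa : (addr f).toNat = f := toNat_addr f (by omega)
  -- `*f` is inside the user region: the range fact for the UNCHECKED accesses (0x10d213, 0x10d25b, 0x10d264, 0x10d2cf …)
  have hobj : Lay.Has (addr f) 1808 := by u_omega
  -- the callee may clobber every caller-saved register
  replace w_kept := w_kept.mono_all (S' := [.rbx, .rsp, .rbp, .r12, .r13, .rdi, .rax, .rcx, .rdx, .rsi, .r8, .r9, .r10, .r11,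
    .r16, .r17, .r18, .r19, .r20, .r21, .r22, .r23, .r24, .r25, .r26, .r27, .r28, .r29, .r30, .r31]) (by rfl)
  u_loop [m] (fun v => Vorbis.mu v.mem f)
  -- 0x10d213 `cmp [rbx+0x6e8], r12d ; jge 10d2ac` (stb_vorbis_fixed.c:1639), then to the call of get8_packet_raw (0x10d223)
  u_walk hcode [hμ.vendor] until [Vorbis.L.get_bits.loop1] span [Vorbis.L.textLo, Vorbis.L.textHi] side (v_side)
  case check_10d2b3 =>
    -- 0x10d2b3, load4 [f + 1764] (`f->acc`)
    have hun' : ShadowUntouched u.mem s_10d2b3.mem := by v_untouched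
    refine hpre.env.obj.accSmall hpre.shadow.inv hun' _ 4 (by decide) (by u_omega) ?_
    simp only [Vorbis.Off.sizeof.stb_vorbis]
    u_omega
  case call_inv =>
    -- DF and the MXCSR masks at the callee's entry: the invariant's `hdf`, `hmx`
    v_inv
  case pre_10d223 =>
    -- the callee's precondition: the shadow clause from the function's own, `Bits` over the push of the return address
    have hun' : ShadowUntouched u.mem s_10d223.mem := by v_untouched
    have hsh' : ShadowPre others frames s_10d223 :=
      hpre.shadow.call hun' (by u_omega) (by u_omega) (by u_omega)
    have hkeep := Vorbis.Spec.Reader.store_off_obj hrp.bits (u.reg .rsp - 48) 8 1102376 (by u_omega) (by u_omega)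
    rw [← w_mem] at hkeep
    refine hpre.again hsh' ?_ ?_
    · rw [w_rdi, ← hf, addr_toNat]
    · rw [hf]
      exact hkeep.1.bits
  · -- the loop's exit (`jge` taken: `n ≤ valid_bits`): the extraction, walked to the `ret`
    have hnm : n ≤ m := by
      rw [hnI, ofNat32_toInt m (by omega)] at hbr_10d21a
      omega
    have hN : (Word.part Width.w32 (u.reg .rsi)).toNat = n := by
      rw [Asan.part32_toNat]
      exact hn
    rw [← hf] at hsame
    refine ReachVia.done (Or.inl ?_)
    v_returned
    show Vorbis.Spec.GetBitsSpecPost Blk len (u.reg .rdi).toNat (Vorbis.Spec.bitsArg u) u s_10d2ee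
    rw [hf, Vorbis.Spec.bitsArg_def, hn]
    refine ⟨by v_untouched, ?_⟩
    rw [w_mem, w_rax]
    refine take_post hrp.bits hrp.mu_le hvb0 ?_ _ _ (by u_omega) (by u_omega) _ _ ?_
      (Vorbis.Spec.BitReader.take_result _ _ n hN hn24)
    · intro h0 hn1
      rcases hprog h0 with h | h
      · omega
      · exact h
    · have e := Vorbis.Spec.GetBits.sub_toInt m (Word.part Width.w32 (u.reg .rsi)) (by omega) (by omega)
      rw [e, hN]
      omega
  -- 0x10d228, the state get8_packet_raw returned (stb_vorbis_fixed.c:1640): its footprint and postcondition over `f`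
  have c_rdi := w_rdi_10d223
  have c_rsp := w_rsp_10d223
  v_after_call w_rsp_10d223 w_mem_10d223
  simp only [c_rdi, hfa] at w_same
  have hpost : Vorbis.Spec.PacketRawPost Blk len f s_10d223 s_10d223r := by
    have hp := w_post
    simp only [Vorbis.Spec.get8_packet_raw.spec, c_rdi, hfa] at hp
    exact hp
  have hkeep := Vorbis.Spec.Reader.store_off_obj hrp.bits (u.reg .rsp - 48) 8 1102376 (by u_omega) (by u_omega)
  rw [← w_mem_10d223] at hkeep
  -- the invariant's clauses at the returned state
  have hs0r : UInt64.ofNat (s_10d223r.mem.readLE (u.reg .rsp) 8) = ret := by u_frame hs0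
  have hs1r : UInt64.ofNat (s_10d223r.mem.readLE (u.reg .rsp - 8) 8) = u.reg .r13 := by u_frame hs1
  have hs2r : UInt64.ofNat (s_10d223r.mem.readLE (u.reg .rsp - 16) 8) = u.reg .r12 := by u_frame hs2
  have hs3r : UInt64.ofNat (s_10d223r.mem.readLE (u.reg .rsp - 24) 8) = u.reg .rbp := by u_frame hs3
  have hs4r : UInt64.ofNat (s_10d223r.mem.readLE (u.reg .rsp - 32) 8) = u.reg .rbx := by u_frame hs4
  have hmr : s_10d223r.mem.readLE (addr f + 1768) 4 = m := by u_frame hm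
  have hunr : ShadowUntouched u.mem s_10d223r.mem := by v_untouched
  have hrpr : ReaderPost Blk len u.mem s_10d223r.mem f := (hrp.trans hkeep.1).trans hpost.reader
  have hmur : mu s_10d223.mem f ≤ mu s.mem f := hkeep.1.mu_le
  have hpush : Mem.SameExcept _ u.mem (s.mem.writeLE (u.reg .rsp - 48) 8 1102376) :=
    Mem.SameExcept.step_writeLE' (u.reg .rsp - 48) 8 1102376 hsame (by u_omega) (by u_same_side)
  have hsamer : Mem.SameExcept [⟨(u.reg .rsp).toNat - 304, (u.reg .rsp).toNat⟩,
       ⟨f + 48, f + 56⟩, ⟨f + 84, f + 96⟩, ⟨f + 136, f + 144⟩, ⟨f + 1484, f + 1749⟩, ⟨f + 1752, f + 1784⟩]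
       u.mem s_10d223r.mem := by
    refine Vorbis.Spec.Reader.sameExcept_through_callee hpush w_same ?_
    simp only [List.forall_mem_cons, List.not_mem_nil, false_imp_iff, implies_true, and_true, X86.User.inSpans_cons,
      X86.User.inSpans_nil, or_false]
    repeat' apply And.intro
    all_goals u_omega
  clear w_same hkeep hpush
  -- the result `z`; `cmp eax, -1 ; je 10d28f` (stb_vorbis_fixed.c:1641), both arms
  obtain ⟨z, w_rax⟩ : ∃ z, s_10d223r.reg .rax = z := ⟨_, rfl⟩
  have hstrict := hpost.strict
  rw [w_rax] at hstrict
  u_walk hcode [hμ.vendor] until [Vorbis.L.get_bits.loop1] span [Vorbis.L.textLo, Vorbis.L.textHi] side (v_side)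
  case check_10d296 =>
    -- 0x10d296, store4 [f + 1768] (`f->valid_bits = INVALID_BITS`)
    have hun' : ShadowUntouched u.mem s_10d296.mem := by v_untouched
    refine hpre.env.obj.accSmall hpre.shadow.inv hun' _ 4 (by decide) (by u_omega) ?_
    simp only [Vorbis.Off.sizeof.stb_vorbis]
    u_omega
  case check_10d236 =>
    -- 0x10d236, load4 [f + 1764] (`f->acc`)
    have hun' : ShadowUntouched u.mem s_10d236.mem := by v_untouched
    refine hpre.env.obj.accSmall hpre.shadow.inv hun' _ 4 (by decide) (by u_omega) ?_
    simp only [Vorbis.Off.sizeof.stb_vorbis]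
    u_omega
  case check_10d249 =>
    -- 0x10d249, load4 [f + 1768] (`f->valid_bits`)
    have hun' : ShadowUntouched u.mem s_10d249.mem := by v_untouched
    refine hpre.env.obj.accSmall hpre.shadow.inv hun' _ 4 (by decide) (by u_omega) ?_
    simp only [Vorbis.Off.sizeof.stb_vorbis]
    u_omega
  · -- the end-of-packet arm (`je` taken): `valid_bits = -1`, `return 0`, walked to the `ret`
    rw [← hf] at hsamer
    refine ReachVia.done (Or.inl ?_)
    v_returned
    show Vorbis.Spec.GetBitsSpecPost Blk len (u.reg .rdi).toNat (Vorbis.Spec.bitsArg u) u s_10d2ee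
    rw [hf, Vorbis.Spec.bitsArg_def, hn]
    refine ⟨by v_untouched, ?_⟩
    rw [w_mem, w_rax]
    have e0 : (Word.ofBV 0#32).toNat = 0 := rfl
    rw [e0]
    exact eop_post n hrpr.bits hrpr.mu_le hvb0 _ _ (by u_omega) (by u_omega)
  · -- 0x10d26a, the back edge (stb_vorbis_fixed.c:1645–1646: `f->acc += z << f->valid_bits; f->valid_bits += 8;`)
    have hlt24 : m < 24 := by
      rw [hnI, ofNat32_toInt m (by omega)] at hbr_10d21a
      omega
    have hne : z ≠ Vorbis.Spec.EOP := by
      intro h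
      rw [h, Asan.part32_toNat] at hbr_10d22d
      exact hbr_10d22d (by decide)
    have hlt := hstrict hne
    -- the three stores of the round (the checks' return address, `acc`, `valid_bits + 8`): `Bits` again, μ as the callee left it
    have hx : -1 ≤ (BitVec.setWidth 32 (Word.ofBV (BitVec.ofNat 32 m) + 8).toBitVec).toInt ∧
        (BitVec.setWidth 32 (Word.ofBV (BitVec.ofNat 32 m) + 8).toBitVec).toInt ≤ 32 := by
      rw [Vorbis.Spec.BitReader.vb_add8 m hlt24]
      omega
    have hk : Bits Blk len s_10d26a.mem f ∧ mu s_10d26a.mem f = mu s_10d223r.mem f := by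
      rw [w_mem]
      exact round_stores hrpr.bits _ _ (by u_omega) (by u_omega) _ _ hx
    have hmule := hrp.mu_le
    have hmuler := hrpr.mu_le
    u_loop_back [m + 8]
    · -- still no store to the shadow
      v_untouched
    · -- the direction flag: the checks kept it, the arithmetic wrote status flags only
      rw [w_flags]
      simp only [X86.User.df_setStatus]
      exact w_df_10d249
    · rw [w_mxcsr]
      exact w_mx
    · exact ⟨hk.1, by omega⟩
    · -- `valid_bits` is 8 more
      rw [w_mem, Mem.readLE_writeLE_same _ _ _ _ (by decide), vb_add8_toNat m hlt24]
      omega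
    · omega
    · -- progress: a byte was read
      intro _
      right
      omega
    · -- the measure
      omega

end Vorbis.Spec.get_bits_24
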